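-- pv_equiv track=rewrite | github.com/Xopoko/Experiment-26_P_vs_NP | scripts/entropy_features.py | _find_item_block
-- ===== SOURCE A (Python) =====
-- def _find_item_block(lines: list[str], qid: str) -> list[str] | None:
--     start = None
--     for i, line in enumerate(lines):
--         if line.startswith("- [") and f"**{qid}" in line:
--             start = i
--             break
--     if start is None:
--         return None
--     block = [lines[start]]
--     for j in range(start + 1, len(lines)):
--         line = lines[j]
--         if line.startswith("- ["):
--             break
--         block.append(line)
--     return block
-- ===== SOURCE B (Python) =====
-- def _find_item_block(lines: list[str], qid: str) -> list[str] | None: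
--     # Phase 1: group the document into item blocks (each starts at a "- [" line;
--     # lines before the first item line belong to no block and are dropped).
--     blocks = []
--     current = None
--     for line in lines:
--         if line.startswith("- ["):
--             current = [line]
--             blocks.append(current)
--         elif current is not None:
--             current.append(line)
--     # Phase 2: return the first block whose header line carries the qid marker.
--     marker = f"**{qid}"
--     for block in blocks:
--         if marker in block[0]:
--             return block
--     return None
-- ===== Notes on version B (the rewrite author's own statement) =====
-- stated objective: alternative
-- what changed: B first groups the whole document into a list of item blocks (each headed by a '- [' line) and then searches that block list for the first block whose header contains the qid marker, instead of A's single scan for a matching line followed by an accumulator loop with a break.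
import Mathlib
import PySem

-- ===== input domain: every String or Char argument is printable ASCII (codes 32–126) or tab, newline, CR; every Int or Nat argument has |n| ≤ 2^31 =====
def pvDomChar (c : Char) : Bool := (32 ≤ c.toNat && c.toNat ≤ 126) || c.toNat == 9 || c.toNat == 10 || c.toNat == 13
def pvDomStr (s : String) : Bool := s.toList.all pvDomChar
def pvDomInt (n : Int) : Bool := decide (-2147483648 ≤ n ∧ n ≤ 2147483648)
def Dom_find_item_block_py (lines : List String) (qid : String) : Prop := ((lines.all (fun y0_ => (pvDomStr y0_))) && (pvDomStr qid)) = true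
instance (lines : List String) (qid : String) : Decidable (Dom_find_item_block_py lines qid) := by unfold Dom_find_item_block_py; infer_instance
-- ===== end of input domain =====

-- B first groups the whole document into item blocks, then searches that block list
-- for the one whose header carries the qid marker; objective: alternative (same cost).

-- ===== PORT A =====
-- first loop of A: enumerate with break, returning the index of the first matching line
def pvA_findStart (lines : List String) (qid : String) (i : Nat) : Option Nat :=
  match lines with
  | [] => none
  | line :: rest =>
      if PySem.Str.startswith line "- [" && PySem.Str.isIn ("**" ++ qid) line then some i
      else pvA_findStart rest qid (i + 1)

-- second loop of A: append lines until one starts with "- [" (the break)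
def pvA_collect (lines : List String) : List String :=
  match lines with
  | [] => []
  | line :: rest =>
      if PySem.Str.startswith line "- [" then []
      else line :: pvA_collect rest

def find_item_block_py (lines : List String) (qid : String) : Option (List String) :=
  match pvA_findStart lines qid 0 with
  | none => none
  | some start =>
      -- block = [lines[start]] then the loop over range(start+1, len(lines))
      some ((lines.drop start).take 1 ++ pvA_collect (lines.drop (start + 1)))

-- ===== PORT B =====
def pvB_isItem (line : String) : Bool := PySem.Str.startswith line "- ["

-- phase 1 of B: group the lines into blocks, each headed by a "- [" line;
-- lines before the first item line join no block and are dropped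
def pvB_blocks (lines : List String) : List (List String) :=
  match lines with
  | [] => []
  | l :: rest =>
      if pvB_isItem l then
        (l :: rest.takeWhile (fun x => !pvB_isItem x)) ::
          pvB_blocks (rest.dropWhile (fun x => !pvB_isItem x))
      else pvB_blocks rest
termination_by lines.length
decreasing_by
  · have := List.length_dropWhile_le (fun x => !pvB_isItem x) rest
    simp; omega
  · simp

-- phase 2 of B: first block whose header line contains the marker
def find_item_block_py_alt (lines : List String) (qid : String) : Option (List String) :=
  -- "marker in block[0]": every block is nonempty (headed by its "- [" line), so headD never defaults
  (pvB_blocks lines).find? (fun b => PySem.Str.isIn ("**" ++ qid) (b.headD ""))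

-- ===== PRECONDITION & SPEC =====
def Spec_find_item_block_py (lines : List String) (qid : String) (out : Option (List String)) : Prop := out = find_item_block_py_alt lines qid
instance (lines : List String) (qid : String) (out : Option (List String)) : Decidable (Spec_find_item_block_py lines qid out) := by unfold Spec_find_item_block_py; infer_instance

-- ===== CLAIM (what is proved, stated in full; the proofs are below) =====
def Claim_equal_find_item_block_py : Prop := ∀ (lines : List String) (qid : String), Dom_find_item_block_py lines qid → Spec_find_item_block_py lines qid (find_item_block_py lines qid)

-- ===== LEMMAS AND PROOFS =====

-- shared middle form: skip non-matching lines, then emit the head line plus its body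
def pvF (qid : String) (lines : List String) : Option (List String) :=
  match lines with
  | [] => none
  | l :: rest =>
      if pvB_isItem l && PySem.Str.isIn ("**" ++ qid) l then
        some (l :: rest.takeWhile (fun x => !pvB_isItem x))
      else pvF qid rest

lemma pvA_collect_eq_takeWhile (lines : List String) :
    pvA_collect lines = lines.takeWhile (fun x => !pvB_isItem x) := by
  induction lines with
  | nil => rfl
  | cons l rest ih =>
      rw [pvA_collect, List.takeWhile_cons]
      cases hb : pvB_isItem l with
      | true =>
          rw [if_pos (show PySem.Str.startswith l "- [" = true from hb)]; simp
      | false =>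
          rw [if_neg (show ¬ PySem.Str.startswith l "- [" = true by exact fun h => by rw [show PySem.Str.startswith l "- [" = pvB_isItem l from rfl, hb] at h; exact Bool.false_ne_true h), ih]
          simp

lemma pvA_findStart_shift (qid : String) (xs : List String) (i : Nat) :
    pvA_findStart xs qid i = (pvA_findStart xs qid 0).map (· + i) := by
  induction xs generalizing i with
  | nil => rfl
  | cons x xt ihx =>
      rw [pvA_findStart, pvA_findStart]
      cases hx : (PySem.Str.startswith x "- [" && PySem.Str.isIn ("**" ++ qid) x) with
      | true => rw [if_pos rfl, if_pos rfl]; simp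
      | false =>
          rw [if_neg (by simp), if_neg (by simp), ihx (i+1), ihx 1, Option.map_map]
          cases pvA_findStart xt qid 0 with
          | none => rfl
          | some s => simp only [Option.map_some, Function.comp_apply, Option.some.injEq]; omega

lemma pvA_eq_pvF (lines : List String) (qid : String) :
    find_item_block_py lines qid = pvF qid lines := by
  induction lines with
  | nil => rfl
  | cons l rest ih =>
      rw [find_item_block_py, pvA_findStart, pvF]
      cases hm : (PySem.Str.startswith l "- [" && PySem.Str.isIn ("**" ++ qid) l) with
      | true =>
          rw [if_pos rfl, if_pos (show (pvB_isItem l && PySem.Str.isIn ("**" ++ qid) l) = true from hm)]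
          simp [pvA_collect_eq_takeWhile]
      | false =>
          rw [if_neg (by simp),
              if_neg (show ¬ (pvB_isItem l && PySem.Str.isIn ("**" ++ qid) l) = true by
                intro h
                have h2 : (PySem.Str.startswith l "- [" && PySem.Str.isIn ("**" ++ qid) l) = true := h
                rw [hm] at h2
                exact Bool.false_ne_true h2)]
          rw [pvA_findStart_shift qid rest 1, ← ih, find_item_block_py]
          cases hs : pvA_findStart rest qid 0 with
          | none => rfl
          | some s => simp [List.drop_succ_cons]

lemma pvF_dropWhile (qid : String) (rest : List String) :
    pvF qid (rest.dropWhile (fun x => !pvB_isItem x)) = pvF qid rest := by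
  induction rest with
  | nil => rfl
  | cons x xt ih =>
      rw [List.dropWhile_cons]
      cases hx : pvB_isItem x with
      | true => simp
      | false =>
          have hstep : (if (!false) = true then List.dropWhile (fun x => !pvB_isItem x) xt else x :: xt)
              = List.dropWhile (fun x => !pvB_isItem x) xt := by simp
          rw [hstep, ih, pvF, if_neg (by rw [hx]; simp)]

lemma pvB_eq_pvF (lines : List String) (qid : String) :
    find_item_block_py_alt lines qid = pvF qid lines := by
  unfold find_item_block_py_alt
  induction lines using pvB_blocks.induct with
  | case1 => rw [pvB_blocks]; rfl
  | case2 l rest hl ih =>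
      rw [pvB_blocks, if_pos hl, List.find?_cons, pvF]
      simp only [List.headD_cons]
      cases hq : PySem.Str.isIn ("**" ++ qid) l with
      | true => simp [hl]
      | false =>
          simp only [Bool.and_false, Bool.false_eq_true, if_false]
          rw [ih, pvF_dropWhile]
  | case3 l rest hl ih =>
      rw [pvB_blocks, if_neg hl, ih, pvF]
      simp only [Bool.not_eq_true] at hl
      rw [if_neg (by rw [hl]; simp)]

-- ===== VERDICT (by name: the statement is the Claim_ definition above) =====
theorem find_item_block_py_spec : Claim_equal_find_item_block_py := by
  intro lines qid _
  unfold Spec_find_item_block_py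
  rw [pvA_eq_pvF, pvB_eq_pvF]
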